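-- pv_equiv track=rewrite | github.com/LuisDavidJM/ChainCode_Master | Code3OT.py | f4_to_3ot
-- ===== SOURCE A (Python) =====
-- def f4_to_3ot(f4_sequence):
--     _3ot_sequence = []
--     n = len(f4_sequence)
--
--     for i in range(n):
--         # El elemento siguiente en la secuencia cíclica
--         next_i = (i + 1) % n
--
--         # Si C_F4(i + 1) es igual a C_F4(i), entonces C_3OT(i) es 0
--         if f4_sequence[next_i] == f4_sequence[i]:
--             _3ot_sequence.append("0")
--         else:
--             # Si no son iguales, verificamos las condiciones para 1 y 2
--             k = find_k(f4_sequence, i)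
--             if f4_sequence[next_i] == f4_sequence[k]:
--                 _3ot_sequence.append("1")
--             elif f4_sequence[next_i] == (f4_sequence[k] + 2) % 4:
--                 _3ot_sequence.append("2")
--             else:
--                 # Este caso no debería ocurrir con una secuencia F4 válida
--                 pass
--
--     return _3ot_sequence
--
-- def find_k(f4_sequence, i):
--     # Encontrar k tal que C_F4(k) != C_F4(k+1) == C_F4(k+2) ... == C_F4(i)
--     k = (i - 1) % len(f4_sequence)
--     while f4_sequence[k] == f4_sequence[i] and k != i:
--         k = (k - 1) % len(f4_sequence)
--     return k
-- ===== SOURCE B (Python) =====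
-- def f4_to_3ot(f4_sequence):
--     n = len(f4_sequence)
--     if n == 0:
--         return []
--     first = f4_sequence[0]
--     # value of the nearest previous (cyclically) element differing from f4_sequence[0]
--     last = next((v for v in reversed(f4_sequence) if v != first), None)
--     out = []
--     for i in range(n):
--         cur = f4_sequence[i]
--         nxt = f4_sequence[(i + 1) % n]
--         if i > 0 and f4_sequence[i - 1] != cur:
--             last = f4_sequence[i - 1]
--         if nxt == cur:
--             out.append("0")
--         elif nxt == last:
--             out.append("1")
--         elif nxt == (last + 2) % 4:
--             out.append("2")
--     return out
-- ===== Notes on version B (the rewrite author's own statement) =====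
-- stated objective: alternative
-- what changed: Replaced the per-index backward modular scan (find_k) by a single forward pass that carries the previous run's value in one variable (initialised by one backward scan for the cyclic wrap), so each element is handled in O(1) without modular walking.
import Mathlib
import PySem

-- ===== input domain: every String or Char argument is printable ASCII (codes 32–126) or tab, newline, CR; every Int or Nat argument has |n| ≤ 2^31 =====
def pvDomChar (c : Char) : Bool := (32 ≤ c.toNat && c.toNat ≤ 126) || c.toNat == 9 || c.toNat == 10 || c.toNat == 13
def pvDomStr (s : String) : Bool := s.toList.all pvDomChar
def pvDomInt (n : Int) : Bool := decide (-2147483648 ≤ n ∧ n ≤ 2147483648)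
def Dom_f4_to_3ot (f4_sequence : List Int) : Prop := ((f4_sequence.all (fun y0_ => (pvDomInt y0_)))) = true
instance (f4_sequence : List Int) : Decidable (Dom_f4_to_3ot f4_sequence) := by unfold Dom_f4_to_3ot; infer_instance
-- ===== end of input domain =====

-- B replaces A's per-index backward modular scan (find_k) by one forward pass carrying the
-- previous run's value in a single variable (alternative decomposition, same return value).

-- ===== PORT A =====
-- while-loop of find_k as fuel recursion: k starts at (i-1)%n and is decremented cyclically,
-- so the guard k == i stops it after at most n-1 iterations; fuel n is therefore exact.
def pvFindKGo (f4 : List Int) (i : Int) (k : Int) : Nat → Int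
  | 0 => k
  | fuel + 1 =>
    if PySem.List.pyGetD f4 k 0 = PySem.List.pyGetD f4 i 0 ∧ k ≠ i then
      pvFindKGo f4 i (PySem.Int.mod (k - 1) (f4.length : Int)) fuel
    else k

def pvFindK (f4 : List Int) (i : Int) : Int :=
  pvFindKGo f4 i (PySem.Int.mod (i - 1) (f4.length : Int)) f4.length

-- loop body of A's `for i in range(n)` (indices produced by range are always in range, so pyGetD is exact)
def pvStepA (f4 : List Int) (acc : List String) (i : Int) : List String :=
  let next_i := PySem.Int.mod (i + 1) (f4.length : Int)
  if PySem.List.pyGetD f4 next_i 0 = PySem.List.pyGetD f4 i 0 then acc ++ ["0"]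
  else
    let k := pvFindK f4 i
    if PySem.List.pyGetD f4 next_i 0 = PySem.List.pyGetD f4 k 0 then acc ++ ["1"]
    else if PySem.List.pyGetD f4 next_i 0 = PySem.Int.mod (PySem.List.pyGetD f4 k 0 + 2) 4 then acc ++ ["2"]
    else acc

def f4_to_3ot (f4_sequence : List Int) : List String :=
  (PySem.List.pyRange 0 (f4_sequence.length : Int)).foldl (pvStepA f4_sequence) []

-- ===== PORT B =====
-- loop body of B's `for i in range(n)`; state = (last, out).  The branch `(last + 2) % 4` is only
-- reached when last ≠ None (a differing neighbour exists), so `last.getD 0` is exact there.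
def pvStepB (f4 : List Int) (st : Option Int × List String) (i : Int) : Option Int × List String :=
  let cur := PySem.List.pyGetD f4 i 0
  let nxt := PySem.List.pyGetD f4 (PySem.Int.mod (i + 1) (f4.length : Int)) 0
  let last := if 0 < i ∧ PySem.List.pyGetD f4 (i - 1) 0 ≠ cur then some (PySem.List.pyGetD f4 (i - 1) 0) else st.1
  if nxt = cur then (last, st.2 ++ ["0"])
  else if last = some nxt then (last, st.2 ++ ["1"])
  else if nxt = PySem.Int.mod (last.getD 0 + 2) 4 then (last, st.2 ++ ["2"])
  else (last, st.2)

def f4_to_3ot_alt (f4_sequence : List Int) : List String :=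
  if f4_sequence.length = 0 then []
  else
    -- `next((v for v in reversed(xs) if v != first), None)` = find? on the reversed list
    let init : Option Int := f4_sequence.reverse.find? (fun v => v != PySem.List.pyGetD f4_sequence 0 0)
    ((PySem.List.pyRange 0 (f4_sequence.length : Int)).foldl (pvStepB f4_sequence) (init, [])).2

-- ===== PRECONDITION & SPEC =====
def Spec_f4_to_3ot (f4_sequence : List Int) (out : List String) : Prop := out = f4_to_3ot_alt f4_sequence
instance (f4_sequence : List Int) (out : List String) : Decidable (Spec_f4_to_3ot f4_sequence out) := by unfold Spec_f4_to_3ot; infer_instance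

-- ===== CLAIM (what is proved, stated in full; the proofs are below) =====
def Claim_equal_f4_to_3ot : Prop := ∀ (f4_sequence : List Int), Dom_f4_to_3ot f4_sequence → Spec_f4_to_3ot f4_sequence (f4_to_3ot f4_sequence)

-- ===== LEMMAS AND PROOFS =====

-- value at Nat index j (indices in the proofs are always < length, so the default is irrelevant)
def pvGv (f4 : List Int) (j : Nat) : Int := f4.getD j 0

-- the positions visited by find_k's scan: k, k-1, …, cyclically, `m` of them
def pvPos (n k : Nat) : Nat → List Nat
  | 0 => []
  | m + 1 => k :: pvPos n ((k + n - 1) % n) m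

-- candidate values for index i in scan order i-1, …, 0, n-1, …, i
def pvC (f4 : List Int) (i : Nat) : List Int := (f4.take i).reverse ++ (f4.drop i).reverse

-- value of the nearest previous (cyclically) element differing from f4[i]
def pvD (f4 : List Int) (i : Nat) : Option Int := (pvC f4 i).find? (fun v => v != pvGv f4 i)

theorem pvModSub1 (i n : Nat) (h : i < n) :
    PySem.Int.mod ((i : Int) - 1) (n : Int) = ((i + n - 1) % n : Nat) := by
  rw [PySem.Int.mod_eq_emod_of_pos (by exact_mod_cast Nat.pos_of_ne_zero (by omega))]
  have e : (i : Int) - 1 = ((i + n - 1 : Nat) : Int) - n := by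
    push_cast [Nat.cast_sub (by omega : 1 ≤ i + n)]; ring
  rw [e, Int.sub_emod_right]
  push_cast
  rfl

theorem pvPos_eq_range' (n : Nat) : ∀ (m j : Nat), m ≤ j + 1 → j < n →
    pvPos n j m = (List.range' (j + 1 - m) m).reverse := by
  intro m
  induction m with
  | zero => simp [pvPos]
  | succ m ih =>
    intro j hm hj
    match j, hm with
    | 0, hm =>
      have hm0 : m = 0 := by omega
      subst hm0
      simp [pvPos]
    | j + 1, hm =>
      have e1 : (j + 1 + n - 1) % n = j := by
        have : j + 1 + n - 1 = j + n := by omega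
        rw [this, Nat.add_mod_right, Nat.mod_eq_of_lt (by omega)]
      have e2 : j + 1 + 1 - (m + 1) = j + 1 - m := by omega
      rw [pvPos, e1, ih j (by omega) (by omega), e2]
      rw [List.range'_concat, List.reverse_append]
      simp
      omega

theorem pvPos_split (n b : Nat) : ∀ (a k : Nat), a ≤ k + 1 → k < n →
    pvPos n k (a + b) = pvPos n k a ++ pvPos n ((k + n - a) % n) b := by
  intro a
  induction a with
  | zero =>
    intro k _ hk
    simp [pvPos, Nat.mod_eq_of_lt hk]
  | succ a ih =>
    intro k ha hk
    match k, ha with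
    | 0, ha =>
      have ha0 : a = 0 := by omega
      subst ha0
      have e0 : 0 + 1 + b = b + 1 := by omega
      have e1 : (0 + n - 1) % n = n - 1 := by rw [Nat.zero_add, Nat.mod_eq_of_lt (by omega)]
      have e2 : (0 + n - (0 + 1)) % n = n - 1 := by
        have : 0 + n - (0 + 1) = n - 1 := by omega
        rw [this, Nat.mod_eq_of_lt (by omega)]
      rw [e0, pvPos, e1]
      rfl
    | k + 1, ha =>
      have e1 : (k + 1 + n - 1) % n = k := by
        have : k + 1 + n - 1 = k + n := by omega
        rw [this, Nat.add_mod_right, Nat.mod_eq_of_lt (by omega)]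
      have e2 : (k + n - a) % n = (k + 1 + n - (a + 1)) % n := by
        congr 1; omega
      have estep : a + 1 + b = (a + b) + 1 := by omega
      rw [estep, pvPos, pvPos, e1, ih k (by omega) (by omega), e2]
      simp

theorem pvMapGv (f4 : List Int) : ∀ (m a : Nat), a + m ≤ f4.length →
    (List.range' a m).map (pvGv f4) = (f4.drop a).take m := by
  intro m
  induction m with
  | zero => simp
  | succ m ih =>
    intro a ha
    have hlt : a < f4.length := by omega
    rw [List.range'_succ, List.map_cons, ih (a + 1) (by omega),
      List.drop_eq_getElem_cons hlt, List.take_succ_cons]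
    simp [pvGv, List.getD_eq_getElem?_getD, List.getElem?_eq_getElem hlt]

theorem pvScan (f4 : List Int) (i : Nat) (h : i < f4.length) :
    pvPos f4.length ((i + f4.length - 1) % f4.length) (f4.length - 1)
      = (List.range' 0 i).reverse ++ (List.range' (i + 1) (f4.length - 1 - i)).reverse := by
  set n := f4.length with hn
  match i, h with
  | 0, h =>
    have e : (0 + n - 1) % n = n - 1 := by rw [Nat.zero_add, Nat.mod_eq_of_lt (by omega)]
    rw [e, pvPos_eq_range' n (n - 1) (n - 1) (by omega) (by omega)]
    have : n - 1 + 1 - (n - 1) = 1 := by omega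
    rw [this]
    simp
  | i + 1, h =>
    have e : (i + 1 + n - 1) % n = i := by
      have : i + 1 + n - 1 = i + n := by omega
      rw [this, Nat.add_mod_right, Nat.mod_eq_of_lt (by omega)]
    have esum : n - 1 = (i + 1) + (n - 1 - (i + 1)) := by omega
    rw [e, esum, pvPos_split n _ (i + 1) i (by omega) (by omega),
      pvPos_eq_range' n (i + 1) i (by omega) (by omega)]
    have e2 : (i + n - (i + 1)) % n = n - 1 := by
      have : i + n - (i + 1) = n - 1 := by omega
      rw [this, Nat.mod_eq_of_lt (by omega)]
    rw [e2, pvPos_eq_range' n (n - 1 - (i + 1)) (n - 1) (by omega) (by omega)]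
    have e3 : i + 1 - (i + 1) = 0 := by omega
    have e4 : n - 1 + 1 - (n - 1 - (i + 1)) = i + 1 + 1 := by omega
    rw [e3, e4,
      show i + 1 + (n - 1 - (i + 1)) - (i + 1) = n - 1 - (i + 1) from by omega]

theorem pvFindKGo_eq (f4 : List Int) (i : Nat) :
    ∀ (fuel : Nat) (k r fuel2 : Nat), k < f4.length → fuel ≤ fuel2 →
    (pvPos f4.length k fuel).find? (fun p => pvGv f4 p != pvGv f4 i) = some r →
    (∀ p ∈ pvPos f4.length k fuel, p ≠ i) →
    pvFindKGo f4 (i : Int) (k : Int) fuel2 = (r : Int) := by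
  intro fuel
  induction fuel with
  | zero => intro k r fuel2 _ _ hfind _; simp [pvPos] at hfind
  | succ fuel ih =>
    intro k r fuel2 hk hle hfind hmem
    have hki : k ≠ i := hmem k (by rw [pvPos]; exact List.mem_cons_self)
    obtain ⟨fuel2', rfl⟩ : ∃ f', fuel2 = f' + 1 := ⟨fuel2 - 1, by omega⟩
    rw [pvFindKGo]
    rw [pvPos] at hfind
    by_cases hv : pvGv f4 k = pvGv f4 i
    · -- guard true: keep scanning
      have hcond : PySem.List.pyGetD f4 (k : Int) 0 = PySem.List.pyGetD f4 (i : Int) 0 ∧ (k : Int) ≠ (i : Int) := by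
        constructor
        · simpa [PySem.List.pyGetD_natCast, pvGv, List.getD] using hv
        · exact_mod_cast hki
      rw [if_pos hcond, pvModSub1 k f4.length hk]
      have hfind' : (pvPos f4.length ((k + f4.length - 1) % f4.length) fuel).find?
          (fun p => pvGv f4 p != pvGv f4 i) = some r := by
        rwa [List.find?_cons_of_neg (by simp [hv])] at hfind
      exact ih _ r fuel2' (Nat.mod_lt _ (by omega)) (by omega) hfind'
        (fun p hp => hmem p (by rw [pvPos]; exact List.mem_cons_of_mem _ hp))
    · -- guard false: stop; the head is the found position
      have hcond : ¬ (PySem.List.pyGetD f4 (k : Int) 0 = PySem.List.pyGetD f4 (i : Int) 0 ∧ (k : Int) ≠ (i : Int)) := by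
        intro ⟨h1, _⟩
        exact hv (by simpa [PySem.List.pyGetD_natCast, pvGv, List.getD] using h1)
      rw [if_neg hcond]
      have : r = k := by
        rw [List.find?_cons_of_pos (by simp [hv])] at hfind
        exact (Option.some_injective _ hfind).symm
      rw [this]

theorem pvFindK_val (f4 : List Int) (i : Nat) (h : i < f4.length) (v : Int)
    (hD : pvD f4 i = some v) : PySem.List.pyGetD f4 (pvFindK f4 (i : Int)) 0 = v := by
  set n := f4.length with hn
  set L := pvPos n ((i + n - 1) % n) (n - 1) with hL
  have hmap : L.map (pvGv f4) = (f4.take i).reverse ++ (f4.drop (i + 1)).reverse := by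
    rw [hL, hn, pvScan f4 i h, List.map_append, List.map_reverse, List.map_reverse,
      pvMapGv f4 i 0 (by omega), pvMapGv f4 (f4.length - 1 - i) (i + 1) (by omega),
      List.drop_zero,
      List.take_of_length_le (l := List.drop (i + 1) f4) (by rw [List.length_drop]; omega)]
  have hgvI : pvGv f4 i = f4[i] := List.getD_eq_getElem _ _ h
  have hCi : pvC f4 i = L.map (pvGv f4) ++ [f4[i]] := by
    rw [pvC, hmap, List.append_assoc]
    congr 1
    rw [List.drop_eq_getElem_cons h, List.reverse_cons]
  have hDL : pvD f4 i = (L.find? (fun p => pvGv f4 p != pvGv f4 i)).map (pvGv f4) := by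
    rw [pvD, hCi, List.find?_append]
    have h1 : List.find? (fun w => w != pvGv f4 i) [f4[i]] = none := by simp [hgvI]
    rw [h1, Option.or_none, List.find?_map]
    rfl
  obtain ⟨r, hr, hrv⟩ : ∃ r, L.find? (fun p => pvGv f4 p != pvGv f4 i) = some r ∧ pvGv f4 r = v := by
    rw [hDL] at hD
    rcases Option.map_eq_some_iff.1 hD with ⟨r, h1, h2⟩
    exact ⟨r, h1, h2⟩
  have hmemne : ∀ p ∈ L, p ≠ i := by
    intro p hp
    rw [hL, hn, pvScan f4 i h] at hp
    rcases List.mem_append.1 hp with h' | h'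
    · have := List.mem_range'_1.1 (List.mem_reverse.1 h'); omega
    · have := List.mem_range'_1.1 (List.mem_reverse.1 h'); omega
  have hstart : (i + n - 1) % n < n := Nat.mod_lt _ (by omega)
  have hgo := pvFindKGo_eq f4 i (n - 1) ((i + n - 1) % n) r n (by rw [← hn]; exact hstart)
    (by omega) (by rw [← hn, ← hL]; exact hr) (by rw [← hn, ← hL]; exact hmemne)
  rw [pvFindK, ← hn, pvModSub1 i n h, hgo, PySem.List.pyGetD_natCast]
  rw [← hrv]
  rfl

theorem pvD_isSome (f4 : List Int) (i : Nat) (h : i < f4.length)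
    (hne : pvGv f4 ((i + 1) % f4.length) ≠ pvGv f4 i) : ∃ v, pvD f4 i = some v := by
  rcases hD : pvD f4 i with _ | v
  · exfalso
    rw [pvD, List.find?_eq_none] at hD
    have hmem : pvGv f4 ((i + 1) % f4.length) ∈ pvC f4 i := by
      have hlt : (i + 1) % f4.length < f4.length := Nat.mod_lt _ (by omega)
      have : pvGv f4 ((i + 1) % f4.length) ∈ f4 := by
        rw [pvGv, List.getD_eq_getElem _ _ hlt]
        exact List.getElem_mem _
      rw [pvC]
      have h2 : pvGv f4 ((i + 1) % f4.length) ∈ List.take i f4 ∨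
          pvGv f4 ((i + 1) % f4.length) ∈ List.drop i f4 := by
        rw [← List.mem_append, List.take_append_drop]
        exact this
      rcases h2 with h' | h'
      · exact List.mem_append.2 (Or.inl (List.mem_reverse.2 h'))
      · exact List.mem_append.2 (Or.inr (List.mem_reverse.2 h'))
    have := hD _ hmem
    simp at this
    exact hne this
  · exact ⟨v, rfl⟩

theorem pvD_succ (f4 : List Int) (j : Nat) (h : j + 1 < f4.length) :
    pvD f4 (j + 1) = if pvGv f4 j ≠ pvGv f4 (j + 1) then some (pvGv f4 j) else pvD f4 j := by
  have hj : j < f4.length := by omega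
  have hgv : pvGv f4 j = f4[j] := by rw [pvGv, List.getD_eq_getElem _ _ hj]
  have htake : f4.take (j + 1) = f4.take j ++ [f4[j]] := by
    rw [List.take_add_one, List.getElem?_eq_getElem hj]; rfl
  have hdropj : f4.drop j = f4[j] :: f4.drop (j + 1) := List.drop_eq_getElem_cons hj
  by_cases hv : pvGv f4 j = pvGv f4 (j + 1)
  · rw [if_neg (by simpa using hv)]
    have hpred : ((fun v => v != pvGv f4 (j + 1))) = (fun v => v != pvGv f4 j) := by
      funext v; rw [hv]
    have hnone : ((f4[j] : Int) != pvGv f4 j) = false := by simp [← hgv]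
    have h1 : List.find? (fun v => v != pvGv f4 j) [f4[j]] = none := by
      simp [hnone]
    rw [pvD, pvD, pvC, pvC, hpred, htake, hdropj, List.reverse_append, List.reverse_singleton,
      List.singleton_append, List.reverse_cons, List.cons_append,
      List.find?_cons_of_neg (by simp [hnone]), List.find?_append, List.find?_append, List.find?_append, h1,
      Option.or_none]
  · rw [if_pos (by simpa using hv)]
    rw [pvD, pvC, htake, List.reverse_append, List.reverse_singleton, List.singleton_append,
      List.cons_append, List.find?_cons_of_pos (by rw [← hgv]; simpa using hv), hgv]

theorem pvD_zero (f4 : List Int) :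
    pvD f4 0 = f4.reverse.find? (fun v => v != PySem.List.pyGetD f4 0 0) := by
  simp [pvD, pvC, pvGv, PySem.List.pyGetD_zero]

theorem pvMain (f4 : List Int) : ∀ (m : Nat), m ≤ f4.length →
    (PySem.List.pyRange 0 (m : Int)).foldl (pvStepB f4)
        (f4.reverse.find? (fun v => v != PySem.List.pyGetD f4 0 0), [])
      = (pvD f4 (m - 1), (PySem.List.pyRange 0 (m : Int)).foldl (pvStepA f4) []) := by
  intro m
  induction m with
  | zero =>
    intro _
    rw [show ((0 : Nat) : Int) = 0 from rfl, PySem.List.pyRange_one_eq_nil le_rfl]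
    simp [pvD_zero]
  | succ m ih =>
    intro hm1
    have hm : m < f4.length := by omega
    have hcast : ((m + 1 : Nat) : Int) = (m : Int) + 1 := by push_cast; ring
    rw [hcast, PySem.List.pyRange_one_succ_right (by exact_mod_cast Nat.zero_le m),
      List.foldl_append, List.foldl_append, ih (by omega)]
    simp only [List.foldl_cons, List.foldl_nil]
    have hnxt : PySem.List.pyGetD f4 (PySem.Int.mod ((m : Int) + 1) (f4.length : Int)) 0
        = pvGv f4 ((m + 1) % f4.length) := by
      rw [show ((m : Int) + 1) = ((m + 1 : Nat) : Int) from by push_cast; ring,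
        PySem.Int.mod_natCast, PySem.List.pyGetD_natCast]
      rfl
    have hcur : PySem.List.pyGetD f4 ((m : Int)) 0 = pvGv f4 m := by
      rw [PySem.List.pyGetD_natCast]; rfl
    have hlast : (if 0 < (m : Int) ∧ PySem.List.pyGetD f4 ((m : Int) - 1) 0 ≠ pvGv f4 m
        then some (PySem.List.pyGetD f4 ((m : Int) - 1) 0) else pvD f4 (m - 1)) = pvD f4 m := by
      match m, hm with
      | 0, _ => simp
      | j + 1, hm =>
        rw [show ((j + 1 : Nat) : Int) - 1 = ((j : Nat) : Int) from by push_cast; ring,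
          PySem.List.pyGetD_natCast]
        have hpos : (0 : Int) < ((j + 1 : Nat) : Int) := by exact_mod_cast Nat.succ_pos j
        rw [pvD_succ f4 j hm]
        by_cases hvv : pvGv f4 j = pvGv f4 (j + 1)
        · simp [pvGv]
        · simp [pvGv]
    simp only [pvStepA, pvStepB, hnxt, hcur, hlast, Nat.add_sub_cancel]
    by_cases hb0 : pvGv f4 ((m + 1) % f4.length) = pvGv f4 m
    · rw [if_pos hb0, if_pos hb0]
    · obtain ⟨v, hv⟩ := pvD_isSome f4 m hm hb0
      have hkv : PySem.List.pyGetD f4 (pvFindK f4 (m : Int)) 0 = v := pvFindK_val f4 m hm v hv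
      rw [if_neg hb0, if_neg hb0, hv, hkv]
      by_cases hb1 : pvGv f4 ((m + 1) % f4.length) = v
      · rw [if_pos hb1, if_pos (by rw [hb1])]
      · rw [if_neg hb1, if_neg (fun hh => hb1 (Option.some_injective _ hh).symm),
          Option.getD_some]
        by_cases hb2 : pvGv f4 ((m + 1) % f4.length) = PySem.Int.mod (v + 2) 4
        · rw [if_pos hb2, if_pos hb2]
        · rw [if_neg hb2, if_neg hb2]

-- ===== VERDICT (by name: the statement is the Claim_ definition above) =====
theorem f4_to_3ot_spec : Claim_equal_f4_to_3ot := by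
  intro f4 _
  unfold Spec_f4_to_3ot f4_to_3ot f4_to_3ot_alt
  by_cases h0 : f4.length = 0
  · simp [h0, PySem.List.pyRange_one_eq_nil le_rfl]
  · have h : 0 < f4.length := Nat.pos_of_ne_zero h0
    simp only [h0, if_false]
    rw [pvMain f4 f4.length le_rfl]
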